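-- pv_equiv track=rewrite | github.com/glutanimate/codewars | Python/7kyu/char_code_calculation.py | calc_randTests
-- ===== SOURCE A (Python) =====
-- def sumDig(nStr):
--     return sum(map(int, list(nStr)))
--
-- def calc_randTests(x):
--     total1 = ''
--     for char in x:
--         total1 += str(ord(char))
--     total2 = ''
--     for char_ in total1:
--         if char_ == '7':
--             char_ = '1'
--         total2 += char_
--     return sumDig(total1) - sumDig(total2)
-- ===== SOURCE B (Python) =====
-- def calc_randTests(x):
--     # replacing digit '7' by '1' changes the digit sum by 6 per occurrence,
--     # so the answer is 6 times the number of '7' digits in the ord strings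
--     return 6 * sum(str(ord(c)).count('7') for c in x)
-- ===== Notes on version B (the rewrite author's own statement) =====
-- stated objective: faster
-- what changed: Instead of building two whole digit strings by repeated concatenation and summing their digits twice, B makes one pass counting '7' digits in each str(ord(c)) and returns 6 times that count, since replacing a '7' by '1' lowers the digit sum by exactly 6.
import Mathlib
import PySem

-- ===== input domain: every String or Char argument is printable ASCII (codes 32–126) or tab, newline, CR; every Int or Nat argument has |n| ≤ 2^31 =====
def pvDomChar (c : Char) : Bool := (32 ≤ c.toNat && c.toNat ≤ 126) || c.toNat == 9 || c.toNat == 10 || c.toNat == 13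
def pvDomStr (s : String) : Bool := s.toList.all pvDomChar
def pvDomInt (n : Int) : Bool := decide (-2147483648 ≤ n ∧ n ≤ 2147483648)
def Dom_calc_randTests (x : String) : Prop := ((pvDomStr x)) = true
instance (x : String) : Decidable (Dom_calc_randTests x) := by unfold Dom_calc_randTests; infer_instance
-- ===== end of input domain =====

-- B replaces A's quadratic string-building and two digit-sum passes by one pass
-- that counts '7' digits and multiplies by 6 (objective: faster).

-- ===== PORT A =====
-- helper sumDig: sum(map(int, list(nStr))); int(c) is PySem.Int.ofChars? [c].
-- In A, sumDig is only ever applied to strings of decimal digits (str(ord(char))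
-- pieces and their '7'→'1' replacements), where int() never raises; getD 0 is
-- unreachable on those inputs. Strings are handled as their List Char contents.
def pySumDig (cs : List Char) : Int :=
  cs.foldl (fun s c => s + (PySem.Int.ofChars? [c]).getD 0) 0

def calc_randTests (x : String) : Int :=
  -- total1 = '' ; for char in x: total1 += str(ord(char))
  let total1 : List Char :=
    x.toList.foldl (fun acc c => acc ++ PySem.Int.toChars (c.toNat : Int)) []
  -- total2 = '' ; for char_ in total1: if char_ == '7': char_ = '1' ; total2 += char_
  let total2 : List Char :=
    total1.foldl (fun acc c => acc ++ [if c = '7' then '1' else c]) []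
  pySumDig total1 - pySumDig total2

-- ===== PORT B =====
-- 6 * sum(str(ord(c)).count('7') for c in x)
def calc_randTests_alt (x : String) : Int :=
  6 * (x.toList.map (fun c => ((PySem.Int.toChars (c.toNat : Int)).count '7' : Int))).sum

-- ===== PRECONDITION & SPEC =====
def Spec_calc_randTests (x : String) (out : Int) : Prop := out = calc_randTests_alt x
instance (x : String) (out : Int) : Decidable (Spec_calc_randTests x out) := by unfold Spec_calc_randTests; infer_instance

-- ===== CLAIM (what is proved, stated in full; the proofs are below) =====
def Claim_equal_calc_randTests : Prop := ∀ (x : String), Dom_calc_randTests x → Spec_calc_randTests x (calc_randTests x)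

-- ===== LEMMAS AND PROOFS =====

-- digit value of c minus digit value of its '7'→'1' replacement is 6 iff c = '7', else 0
theorem pv_dval_repl (c : Char) :
    (PySem.Int.ofChars? [c]).getD 0
      - (PySem.Int.ofChars? [if c = '7' then '1' else c]).getD 0
      = if c = '7' then 6 else 0 := by
  by_cases h : c = '7' <;> simp [h]
  decide

-- the two digit sums of A differ by 6 per '7' in the list
theorem pv_sumDig_sub (cs : List Char) :
    pySumDig cs - pySumDig (cs.map (fun c => if c = '7' then '1' else c))
      = 6 * (cs.count '7' : Int) := by
  induction cs with
  | nil => simp [pySumDig]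
  | cons c t ih =>
      simp only [pySumDig, List.map_cons, List.map_map, Function.comp_def,
        List.foldl_cons, PySem.List.foldl_add, List.count_cons] at ih ⊢
      have := pv_dval_repl c
      by_cases h : c = '7' <;> simp [h] at this ⊢ <;> omega

-- counting '7' in the concatenation = summing the per-chunk counts
theorem pv_count_flatMap (g : Char → List Char) (l : List Char) :
    ((l.flatMap g).count '7' : Int) = (l.map (fun c => ((g c).count '7' : Int))).sum := by
  induction l with
  | nil => simp
  | cons c t ih => simp [List.count_append, ih]

-- ===== VERDICT (by name: the statement is the Claim_ definition above) =====
theorem calc_randTests_spec : Claim_equal_calc_randTests := by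
  intro x _
  unfold Spec_calc_randTests calc_randTests calc_randTests_alt
  simp only [PySem.List.foldl_append_eq_flatMap, List.nil_append,
    ← List.map_eq_flatMap]
  rw [pv_sumDig_sub, pv_count_flatMap]
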